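-- pv_equiv track=rewrite | github.com/Joelvdb/web_scrapper_moogle | search.py | get_first_pages_with_words
-- ===== SOURCE A (Python) =====
-- def check_if_words_in_page(page_name, words_dict, words):
--     check = True
--
--     for word in words:
--         if word not in words_dict:
--             return False
--         if page_name not in words_dict[word]:
--             check = False
--     return check
--
-- def get_first_pages_with_words(words, words_dict, sorted_ranking_dict, max_results):
--     first_pages = []
--     names_list = list(sorted_ranking_dict.keys())
--     for i in names_list:
--         if len(first_pages) == max_results:
--             return first_pages
--         if check_if_words_in_page(i, words_dict, words):
--             first_pages.append(i)
--     return first_pages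
-- ===== SOURCE B (Python) =====
-- def get_first_pages_with_words(words, words_dict, sorted_ranking_dict, max_results):
--     # Intersect the posting sets of all query words once (None = no constraint yet);
--     # a word with no postings entry contributes the empty set, emptying the intersection.
--     survivors = None
--     for w in words:
--         postings = set(words_dict.get(w, ()))
--         survivors = postings if survivors is None else survivors & postings
--     ranked = [p for p in sorted_ranking_dict if survivors is None or p in survivors]
--     return ranked[:max_results]
-- ===== Notes on version B (the rewrite author's own statement) =====
-- stated objective: alternative
-- what changed: Instead of re-scanning every word's posting list for each ranking key (nested membership scans with an early-exit cap), B intersects the words' posting sets once, filters the ranking keys against the resulting set and truncates with a slice; Pre_ excludes negative max_results, an unspecified corner where A's equality cap never fires (it returns every match) while a plain slice drops trailing elements.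
-- outside the precondition, e.g. on get_first_pages_with_words(['a'], {'a': ['p', 'q']}, {'p': 1, 'q': 2}, -1): A returns ['p', 'q'], B returns ['p']
import Mathlib
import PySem

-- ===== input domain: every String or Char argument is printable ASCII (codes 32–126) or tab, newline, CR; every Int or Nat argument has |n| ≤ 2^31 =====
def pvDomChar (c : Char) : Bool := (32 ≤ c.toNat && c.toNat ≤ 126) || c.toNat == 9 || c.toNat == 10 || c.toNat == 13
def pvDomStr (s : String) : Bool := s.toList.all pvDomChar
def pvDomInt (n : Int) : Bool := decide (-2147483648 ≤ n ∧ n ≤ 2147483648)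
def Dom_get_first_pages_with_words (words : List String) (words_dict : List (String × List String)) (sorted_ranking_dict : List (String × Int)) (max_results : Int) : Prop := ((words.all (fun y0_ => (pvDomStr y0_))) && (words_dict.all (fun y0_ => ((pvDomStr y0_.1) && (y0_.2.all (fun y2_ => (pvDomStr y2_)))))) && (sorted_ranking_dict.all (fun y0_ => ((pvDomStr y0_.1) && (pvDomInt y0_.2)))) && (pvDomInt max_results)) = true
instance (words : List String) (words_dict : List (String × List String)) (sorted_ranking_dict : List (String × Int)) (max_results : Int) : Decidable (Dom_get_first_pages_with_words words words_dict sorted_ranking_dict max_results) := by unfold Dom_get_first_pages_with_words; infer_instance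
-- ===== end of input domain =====

-- B replaces A's per-page re-scan of every word's posting list by a one-time set
-- intersection of the postings followed by a filter of the ranking keys and a slice
-- (objective: alternative).

-- ===== PORT A =====
-- helper: the loop of check_if_words_in_page, carrying the 'check' flag
def pvCheckLoop (page_name : String) (wd : PySem.Dict String (List String)) : List String → Bool → Bool
  | [], check => check
  | w :: rest, check =>
      if wd.contains w = false then false
      else if page_name ∉ (wd.get? w).getD [] then pvCheckLoop page_name wd rest false
      else pvCheckLoop page_name wd rest check

def check_if_words_in_page (page_name : String) (wd : PySem.Dict String (List String)) (words : List String) : Bool :=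
  pvCheckLoop page_name wd words true

-- helper: the main loop over names_list accumulating first_pages
def pvALoop (words : List String) (wd : PySem.Dict String (List String)) (max_results : Int) : List String → List String → List String
  | [], first_pages => first_pages
  | i :: rest, first_pages =>
      if (first_pages.length : Int) = max_results then first_pages
      else if check_if_words_in_page i wd words then pvALoop words wd max_results rest (first_pages ++ [i])
      else pvALoop words wd max_results rest first_pages

def get_first_pages_with_words (words : List String) (words_dict : List (String × List String)) (sorted_ranking_dict : List (String × Int)) (max_results : Int) : List String :=
  let wd := PySem.Dict.mk words_dict
  let names_list := (PySem.Dict.mk sorted_ranking_dict).keys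
  pvALoop words wd max_results names_list []

-- ===== PORT B =====
-- helper: the comprehension's condition 'survivors is None or p in survivors'
def pvSurvive (survivors : Option (PySem.Set String)) (p : String) : Bool :=
  match survivors with
  | none => true
  | some s => PySem.Set.contains s p

def get_first_pages_with_words_alt (words : List String) (words_dict : List (String × List String)) (sorted_ranking_dict : List (String × Int)) (max_results : Int) : List String :=
  let wd := PySem.Dict.mk words_dict
  let survivors : Option (PySem.Set String) :=
    words.foldl (fun acc w =>
      let postings := PySem.Set.ofList ((wd.get? w).getD [])
      match acc with
      | none => some postings
      | some t => some (PySem.Set.inter t postings)) none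
  let ranked := ((PySem.Dict.mk sorted_ranking_dict).keys).filter (fun p => pvSurvive survivors p)
  PySem.List.slice ranked none (some max_results)

-- ===== PRECONDITION & SPEC =====
-- Pre_ excludes negative max_results: an unspecified corner where A's equality cap
-- never fires (A returns every match) while B's slice drops trailing elements;
-- neither convention is specified for a negative result count.
def Pre_get_first_pages_with_words (words : List String) (words_dict : List (String × List String)) (sorted_ranking_dict : List (String × Int)) (max_results : Int) : Prop := 0 ≤ max_results
instance (words : List String) (words_dict : List (String × List String)) (sorted_ranking_dict : List (String × Int)) (max_results : Int) : Decidable (Pre_get_first_pages_with_words words words_dict sorted_ranking_dict max_results) := by unfold Pre_get_first_pages_with_words; infer_instance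

def pvWitness_get_first_pages_with_words : List String × (List (String × List String)) × (List (String × Int)) × Int :=
  (["a"], [("a", ["p"])], [("p", 1)], 5)

def Spec_get_first_pages_with_words (words : List String) (words_dict : List (String × List String)) (sorted_ranking_dict : List (String × Int)) (max_results : Int) (out : List String) : Prop := out = get_first_pages_with_words_alt words words_dict sorted_ranking_dict max_results
instance (words : List String) (words_dict : List (String × List String)) (sorted_ranking_dict : List (String × Int)) (max_results : Int) (out : List String) : Decidable (Spec_get_first_pages_with_words words words_dict sorted_ranking_dict max_results out) := by unfold Spec_get_first_pages_with_words; infer_instance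

-- ===== CLAIM (what is proved, stated in full; the proofs are below) =====
def Claim_equal_get_first_pages_with_words : Prop := ∀ (words : List String) (words_dict : List (String × List String)) (sorted_ranking_dict : List (String × Int)) (max_results : Int), Dom_get_first_pages_with_words words words_dict sorted_ranking_dict max_results → Pre_get_first_pages_with_words words words_dict sorted_ranking_dict max_results → Spec_get_first_pages_with_words words words_dict sorted_ranking_dict max_results (get_first_pages_with_words words words_dict sorted_ranking_dict max_results)

-- ===== LEMMAS AND PROOFS =====

-- the check loop computes: all words known, the flag, and page in every posting
theorem pvCheckLoop_eq (page : String) (wd : PySem.Dict String (List String)) (words : List String) (c : Bool) :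
    pvCheckLoop page wd words c =
      (words.all (fun w => wd.contains w) && c &&
       words.all (fun w => decide (page ∈ (wd.get? w).getD []))) := by
  induction words generalizing c with
  | nil => simp [pvCheckLoop]
  | cons w rest ih =>
      simp only [pvCheckLoop, List.all_cons]
      by_cases hc : wd.contains w = false
      · simp [hc]
      · simp only [Bool.not_eq_false] at hc
        by_cases hp : page ∈ (wd.get? w).getD []
        · simp [hc, hp, ih]
        · simp [hc, hp, ih]

-- the check is equivalent to membership in every (possibly empty) posting list
theorem check_eq_allMem (page : String) (wd : PySem.Dict String (List String)) (words : List String) :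
    check_if_words_in_page page wd words =
      words.all (fun w => decide (page ∈ (wd.get? w).getD [])) := by
  rw [check_if_words_in_page, pvCheckLoop_eq]
  by_cases hall : words.all (fun w => wd.contains w)
  · simp [hall]
  · rw [Bool.not_eq_true, List.all_eq_false] at hall
    rcases hall with ⟨w, hw, hnc⟩
    have hget : wd.get? w = none := by
      have := PySem.Dict.contains_eq_isSome_get? (d := wd) (k := w)
      simp only [Bool.not_eq_true] at hnc
      rw [hnc] at this
      exact Option.not_isSome_iff_eq_none.mp (by simp [← this])
    have : words.all (fun w => decide (page ∈ (wd.get? w).getD [])) = false := by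
      rw [List.all_eq_false]
      exact ⟨w, hw, by simp [hget]⟩
    rw [this]
    have : words.all (fun w => wd.contains w) = false :=
      List.all_eq_false.mpr ⟨w, hw, hnc⟩
    simp [this]

-- A's main loop under a non-negative cap: append the filtered survivors, truncated
theorem pvALoop_nonneg (words : List String) (wd : PySem.Dict String (List String)) (m : Int) (hm : 0 ≤ m)
    (names acc : List String) (hlen : acc.length ≤ m.toNat) :
    pvALoop words wd m names acc =
      acc ++ (names.filter (fun i => check_if_words_in_page i wd words)).take (m.toNat - acc.length) := by
  induction names generalizing acc with
  | nil => simp [pvALoop]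
  | cons i rest ih =>
      simp only [pvALoop, List.filter_cons]
      by_cases hfull : (acc.length : Int) = m
      · have : m.toNat - acc.length = 0 := by omega
        simp [hfull, this]
      · have hlt : acc.length < m.toNat := by omega
        by_cases hchk : check_if_words_in_page i wd words
        · have h1 : (acc ++ [i]).length ≤ m.toNat := by simp; omega
          rw [if_neg hfull, if_pos hchk, ih (acc ++ [i]) h1]
          have : m.toNat - acc.length = (m.toNat - (acc ++ [i]).length) + 1 := by simp; omega
          simp [hchk, this, List.take_succ_cons]
        · rw [if_neg hfull, if_neg hchk, ih acc hlen]
          simp [hchk]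

-- B's survivor fold membership: page survives iff page is in every posting
theorem pvSurvivors_mem (wd : PySem.Dict String (List String)) (page : String) (words : List String)
    (acc : Option (PySem.Set String)) :
    pvSurvive (words.foldl (fun acc w =>
        let postings := PySem.Set.ofList ((wd.get? w).getD [])
        match acc with
        | none => some postings
        | some t => some (PySem.Set.inter t postings)) acc) page =
    (pvSurvive acc page &&
     words.all (fun w => decide (page ∈ (wd.get? w).getD []))) := by
  induction words generalizing acc with
  | nil => cases acc <;> simp [pvSurvive]
  | cons w rest ih =>
      simp only [List.foldl_cons, List.all_cons]
      rw [ih]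
      cases acc with
      | none =>
          by_cases h2 : page ∈ (wd.get? w).getD [] <;>
            simp [pvSurvive, PySem.Set.mem_ofList, h2]
      | some t =>
          by_cases h1 : page ∈ t <;> by_cases h2 : page ∈ (wd.get? w).getD [] <;>
            simp [pvSurvive, PySem.Set.mem_inter, PySem.Set.mem_ofList, h1, h2]

-- ===== VERDICT (by name: the statement is the Claim_ definition above) =====
theorem get_first_pages_with_words_spec : Claim_equal_get_first_pages_with_words := by
  intro words words_dict sorted_ranking_dict max_results _ hpre
  unfold Spec_get_first_pages_with_words
  unfold get_first_pages_with_words get_first_pages_with_words_alt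
  have hm : 0 ≤ max_results := hpre
  set wd := PySem.Dict.mk words_dict with hwd
  set names := (PySem.Dict.mk sorted_ranking_dict).keys with hnames
  rw [pvALoop_nonneg words wd max_results hm names [] (by simp)]
  rw [PySem.List.slice_to _ hm]
  simp only [List.nil_append, List.length_nil, Nat.sub_zero]
  congr 1
  apply List.filter_congr
  intro p _
  rw [check_eq_allMem, pvSurvivors_mem wd p words none]
  simp [pvSurvive]
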